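-- pv_equiv track=rewrite | github.com/Bardia-Masudy/py-practice | indexSeq.py | indexKmers
-- ===== SOURCE A (Python) =====
-- def indexKmers(text: int, k: int) -> dict:
--     index = {}
--     for i in range(len(text)-k+1):
--         kmer = text[i:i+k]
--         if kmer not in index:
--             index.update({kmer: [i]})
--         else:
--             kmerValues = [k for k in index.get(kmer)]
--             kmerValues.append(i)
--             index.update({kmer: kmerValues})
--     return index
-- ===== SOURCE B (Python) =====
-- def indexKmers(text: int, k: int) -> dict:
--     kmers = [text[i:i+k] for i in range(len(text)-k+1)]
--     keys = list(dict.fromkeys(kmers))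
--     return {km: [i for i, x in enumerate(kmers) if x == km] for km in keys}
-- ===== Notes on version B (the rewrite author's own statement) =====
-- stated objective: alternative
-- what changed: Replaces the incremental dict-with-list-copy loop by: build the k-mer list once, dedupe keys in first-occurrence order, then gather each key's positions with one comprehension per key.
import Mathlib
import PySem

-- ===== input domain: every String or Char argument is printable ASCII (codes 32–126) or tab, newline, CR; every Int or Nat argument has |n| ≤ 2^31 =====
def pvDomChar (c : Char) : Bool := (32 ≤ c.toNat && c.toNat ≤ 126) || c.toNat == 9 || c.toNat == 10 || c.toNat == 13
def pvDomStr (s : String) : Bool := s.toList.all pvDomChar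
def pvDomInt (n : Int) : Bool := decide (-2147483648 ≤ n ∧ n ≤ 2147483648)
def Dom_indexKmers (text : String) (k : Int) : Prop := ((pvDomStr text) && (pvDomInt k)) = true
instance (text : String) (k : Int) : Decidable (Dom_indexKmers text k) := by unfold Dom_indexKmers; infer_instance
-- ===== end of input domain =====

-- ===== PORT A =====
-- B builds the k-mer list once, dedupes keys in first-occurrence order, and gathers
-- positions per key; proved to return exactly A's dict (same key order, same lists).
def indexKmers (text : String) (k : Int) : List (String × List Int) :=
  ((PySem.List.pyRange 0 (PySem.Str.len text - k + 1) 1).foldl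
    (fun index i =>
      let kmer := PySem.Str.slice text (some i) (some (i + k))
      if !(index.contains kmer) then
        index.insert kmer [i]
      else
        let kmerValues := ((index.get? kmer).getD []).map (fun x => x)
        index.insert kmer (kmerValues ++ [i]))
    (PySem.Dict.empty : PySem.Dict String (List Int))).items

-- ===== PORT B =====
def indexKmers_alt (text : String) (k : Int) : List (String × List Int) :=
  let kmers := (PySem.List.pyRange 0 (PySem.Str.len text - k + 1) 1).map
      (fun i => PySem.Str.slice text (some i) (some (i + k)))
  let keys := PySem.List.dedup kmers
  keys.map (fun km =>
    (km, (PySem.List.enumerate kmers 0).filterMap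
          (fun p => if p.2 == km then some p.1 else none)))

-- ===== PRECONDITION & SPEC =====
def Spec_indexKmers (text : String) (k : Int) (out : List (String × List Int)) : Prop := out = indexKmers_alt text k
instance (text : String) (k : Int) (out : List (String × List Int)) : Decidable (Spec_indexKmers text k out) := by unfold Spec_indexKmers; infer_instance

-- ===== CLAIM (what is proved, stated in full; the proofs are below) =====
def Claim_equal_indexKmers : Prop := ∀ (text : String) (k : Int), Dom_indexKmers text k → Spec_indexKmers text k (indexKmers text k)

-- ===== LEMMAS AND PROOFS =====

-- A's loop body, as a function of the dict and the pair (position, k-mer)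
def pvStep (d : PySem.Dict String (List Int)) (p : Int × String) : PySem.Dict String (List Int) :=
  if !(d.contains p.2) then
    d.insert p.2 [p.1]
  else
    let kmerValues := ((d.get? p.2).getD []).map (fun x => x)
    d.insert p.2 (kmerValues ++ [p.1])

-- positions of km among the enumerated k-mers E
def pvPos (E : List (Int × String)) (km : String) : List Int :=
  E.filterMap (fun p => if p.2 == km then some p.1 else none)

def pvRHS (E : List (Int × String)) : List (String × List Int) :=
  (PySem.List.dedup (E.map (·.2))).map (fun km => (km, pvPos E km))

theorem pvPos_append (E : List (Int × String)) (i : Int) (km c : String) :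
    pvPos (E ++ [(i, km)]) c = pvPos E c ++ (if km = c then [i] else []) := by
  unfold pvPos
  rw [List.filterMap_append]
  by_cases h : km = c <;> simp [List.filterMap, h]

theorem pvPos_nil_of_not_mem (E : List (Int × String)) (km : String)
    (h : km ∉ E.map (·.2)) : pvPos E km = [] := by
  unfold pvPos
  rw [List.filterMap_eq_nil_iff]
  intro p hp
  have : p.2 ≠ km := fun he => h (he ▸ List.mem_map_of_mem hp)
  simp [this]

theorem pvMain (E : List (Int × String)) :
    (E.foldl pvStep PySem.Dict.empty).items = pvRHS E := by
  induction E using List.reverseRecOn with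
  | nil => rfl
  | append_singleton E p ih =>
    obtain ⟨i, km⟩ := p
    rw [List.foldl_append, List.foldl_cons, List.foldl_nil]
    set d := E.foldl pvStep PySem.Dict.empty with hd
    have hkeys : d.keys = PySem.List.dedup (E.map (·.2)) := by
      simp only [PySem.Dict.keys, ih, pvRHS, List.map_map, PySem.List.dedup_eq_ofList]
      rw [show ((fun (x : String × List Int) => x.1) ∘ fun km => (km, pvPos E km)) = id from rfl,
        List.map_id]
    have hnodup : d.keys.Nodup := by rw [hkeys]; exact PySem.List.nodup_dedup _
    have hcont : d.contains km = decide (km ∈ E.map (·.2)) := by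
      rw [PySem.Dict.contains_eq_decide_mem_keys, hkeys]
      simp
    have hsnd : (E ++ [(i, km)]).map (·.2) = E.map (·.2) ++ [km] := by simp
    by_cases hm : km ∈ E.map (·.2)
    · have hc : d.contains km = true := by rw [hcont]; exact decide_eq_true hm
      have hmem : (km, pvPos E km) ∈ d.items := by
        rw [ih]
        exact List.mem_map_of_mem ((PySem.List.mem_dedup _ _).mpr hm)
      have hget : d.get? km = some (pvPos E km) :=
        PySem.Dict.get?_of_mem_items d hmem hnodup
      have hstep : pvStep d (i, km)
          = d.insert km (((d.get? km).getD []).map (fun x => x) ++ [i]) := by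
        simp [pvStep, hc]
      have hded : PySem.List.dedup ((E ++ [(i, km)]).map (·.2))
          = PySem.List.dedup (E.map (·.2)) := by
        rw [hsnd]
        simp only [PySem.List.dedup_eq_ofList, PySem.Set.ofList_append_singleton]
        exact PySem.Set.add_of_mem ((PySem.Set.mem_ofList _ _).mpr hm)
      rw [hstep, PySem.Dict.items_insert_of_contains _ _ hc, ih]
      unfold pvRHS
      rw [hded, List.map_map]
      apply List.map_congr_left
      intro c _
      by_cases hck : c = km
      · subst hck
        simp [hget, pvPos_append]
      · have : ¬ (c == km) = true := by simpa using hck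
        simp [Function.comp, this, pvPos_append, Ne.symm hck]
    · have hc : d.contains km = false := by rw [hcont]; exact decide_eq_false hm
      have hstep : pvStep d (i, km) = d.insert km [i] := by simp [pvStep, hc]
      have hded : PySem.List.dedup ((E ++ [(i, km)]).map (·.2))
          = PySem.List.dedup (E.map (·.2)) ++ [km] := by
        rw [hsnd]
        simp only [PySem.List.dedup_eq_ofList, PySem.Set.ofList_append_singleton]
        exact PySem.Set.add_of_not_mem (fun h => hm ((PySem.Set.mem_ofList _ _).mp h))
      rw [hstep, PySem.Dict.items_insert_of_not_contains _ _ hc, ih]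
      unfold pvRHS
      rw [hded, List.map_append]
      congr 1
      · apply List.map_congr_left
        intro c hcmem
        have hcm : c ∈ E.map (·.2) := (PySem.List.mem_dedup _ _).mp hcmem
        have : km ≠ c := fun he => hm (he ▸ hcm)
        simp [pvPos_append, this]
      · simp [pvPos_append, pvPos_nil_of_not_mem E km hm]

theorem pvEnumMapRange {α : Type} (g : Int → α) (m : Nat) :
    PySem.List.enumerate ((List.range m).map (fun (j : Nat) => g (j : Int))) 0
      = (List.range m).map (fun (j : Nat) => ((j : Int), g (j : Int))) := by
  induction m with
  | zero => simp [PySem.List.enumerate_nil]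
  | succ m ih =>
    rw [List.range_succ, List.map_append, List.map_append,
      PySem.List.enumerate_append, ih]
    simp [PySem.List.enumerate_cons, PySem.List.enumerate_nil]

theorem pvRangeCast (n : Int) :
    PySem.List.pyRange 0 n 1 = (List.range n.toNat).map (fun (j : Nat) => (j : Int)) := by
  rw [PySem.List.pyRange_one]
  simp only [Int.sub_zero, zero_add]

-- ===== VERDICT (by name: the statement is the Claim_ definition above) =====
theorem indexKmers_spec : Claim_equal_indexKmers := by
  intro text k _
  unfold Spec_indexKmers indexKmers indexKmers_alt
  set g : Int → String := fun i => PySem.Str.slice text (some i) (some (i + k)) with hg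
  set n : Int := PySem.Str.len text - k + 1 with hn
  set E : List (Int × String) := (PySem.List.pyRange 0 n 1).map (fun i => (i, g i)) with hE
  have hfold : (PySem.List.pyRange 0 n 1).foldl
      (fun index i =>
        let kmer := g i
        if !(index.contains kmer) then index.insert kmer [i]
        else
          let kmerValues := ((index.get? kmer).getD []).map (fun x => x)
          index.insert kmer (kmerValues ++ [i]))
      (PySem.Dict.empty : PySem.Dict String (List Int))
      = E.foldl pvStep PySem.Dict.empty := by
    rw [hE, List.foldl_map]; rfl
  have henum : PySem.List.enumerate ((PySem.List.pyRange 0 n 1).map g) 0 = E := by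
    rw [hE, pvRangeCast n, List.map_map, List.map_map]
    exact pvEnumMapRange g n.toNat
  have hsnd : E.map (·.2) = (PySem.List.pyRange 0 n 1).map g := by
    rw [hE, List.map_map]; rfl
  rw [hfold, pvMain E]
  unfold pvRHS
  rw [hsnd]
  simp only [henum]
  rfl
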